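-- pv_equiv track=rewrite | github.com/LucasLiorLE/AstralV | cogs/economy.py | find_closest_item
-- ===== SOURCE A (Python) =====
-- def find_closest_item(search_term: str, shop_items: list) -> str:
--     """Find closest matching item name from search term"""
--     normalized_search = "".join(search_term.lower().split())
--     normalized_items = [(item["item"], "".join(item["item"].lower().split())) for item in shop_items]
--
--     for orig, norm in normalized_items:
--         if norm == normalized_search:
--             return orig
--
--     matches = [orig for orig, norm in normalized_items if norm.startswith(normalized_search)]
--     if matches:
--         return min(matches)
--
--     return None
-- ===== SOURCE B (Python) =====
-- def find_closest_item(search_term: str, shop_items: list) -> str: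
--     """Find closest matching item name from search term (single pass)."""
--     target = "".join(search_term.lower().split())
--     best = None
--     for item in shop_items:
--         name = item["item"]
--         norm = "".join(name.lower().split())
--         if norm == target:
--             return name
--         if norm.startswith(target) and (best is None or name < best):
--             best = name
--     return best
-- ===== Notes on version B (the rewrite author's own statement) =====
-- stated objective: simpler
-- what changed: Replaced A's two materialized passes (build a normalized list, scan it for an exact match, then build a matches list and take min) by one streaming pass that returns immediately on an exact match and otherwise threads the lexicographically smallest prefix-matching original name.
import Mathlib
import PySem

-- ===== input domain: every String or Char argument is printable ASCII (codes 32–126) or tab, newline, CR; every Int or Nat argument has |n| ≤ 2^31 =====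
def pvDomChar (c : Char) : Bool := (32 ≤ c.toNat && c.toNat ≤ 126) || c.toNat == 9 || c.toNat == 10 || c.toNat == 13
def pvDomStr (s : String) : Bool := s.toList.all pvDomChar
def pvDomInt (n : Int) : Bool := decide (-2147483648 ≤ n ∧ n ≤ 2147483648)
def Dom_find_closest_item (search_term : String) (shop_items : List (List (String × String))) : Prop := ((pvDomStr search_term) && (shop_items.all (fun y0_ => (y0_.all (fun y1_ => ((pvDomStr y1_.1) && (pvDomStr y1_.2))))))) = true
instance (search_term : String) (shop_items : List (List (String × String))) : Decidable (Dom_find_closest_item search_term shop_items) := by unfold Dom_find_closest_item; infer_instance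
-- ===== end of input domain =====

-- B replaces A's two materialized passes by one streaming pass threading the best prefix match (objective: simpler).
-- Return-value equivalence only; neither program mutates its arguments.

-- ===== PORT A =====
-- "".join(x.lower().split())
def pvNormA (s : String) : String := PySem.Str.join "" (PySem.Str.split₀ (PySem.Str.lower s))

-- item["item"]: first-match lookup; Pre_ guarantees the key is present, so getD's default is never used
def pvItemA (item : List (String × String)) : String := (List.lookup "item" item).getD ""

def find_closest_item (search_term : String) (shop_items : List (List (String × String))) : Option String :=
  let normalized_search := pvNormA search_term
  let normalized_items := shop_items.map (fun item => (pvItemA item, pvNormA (pvItemA item)))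
  -- for orig, norm in normalized_items: if norm == normalized_search: return orig
  match normalized_items.find? (fun p => p.2 == normalized_search) with
  | some p => some p.1
  | none =>
    let matchesL := (normalized_items.filter (fun p => PySem.Str.startswith p.2 normalized_search)).map (·.1)
    match PySem.List.min? matchesL (fun x => x) with
    | some m => some m
    | none => none

-- ===== PORT B =====
def pvNormB (s : String) : String := PySem.Str.join "" (PySem.Str.split₀ (PySem.Str.lower s))

def pvItemB (item : List (String × String)) : String := (List.lookup "item" item).getD ""

-- the single pass of Source B: early return on exact match, else thread the running best
def pvAltLoop (target : String) (best : Option String) : List (List (String × String)) → Option String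
  | [] => best
  | item :: rest =>
    let name := pvItemB item
    let norm := pvNormB name
    if norm == target then some name
    else if PySem.Str.startswith norm target ∧ (best.isNone ∨ name < best.getD name) then
      pvAltLoop target (some name) rest
    else pvAltLoop target best rest

def find_closest_item_alt (search_term : String) (shop_items : List (List (String × String))) : Option String :=
  pvAltLoop (pvNormB search_term) none shop_items

-- ===== PRECONDITION & SPEC =====
-- Pre_ excludes exactly the inputs on which A raises KeyError: some dict lacks the key "item".
def Pre_find_closest_item (search_term : String) (shop_items : List (List (String × String))) : Prop :=
  ∀ item ∈ shop_items, "item" ∈ item.map Prod.fst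
instance (search_term : String) (shop_items : List (List (String × String))) : Decidable (Pre_find_closest_item search_term shop_items) := by unfold Pre_find_closest_item; infer_instance

def pvWitness_find_closest_item : String × (List (List (String × String))) :=
  ("Swo rd", [[("item", "Sword")], [("item", "Shield"), ("price", "5")]])

def Spec_find_closest_item (search_term : String) (shop_items : List (List (String × String))) (out : Option String) : Prop := out = find_closest_item_alt search_term shop_items
instance (search_term : String) (shop_items : List (List (String × String))) (out : Option String) : Decidable (Spec_find_closest_item search_term shop_items out) := by unfold Spec_find_closest_item; infer_instance

-- ===== CLAIM (what is proved, stated in full; the proofs are below) =====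
def Claim_equal_find_closest_item : Prop := ∀ (search_term : String) (shop_items : List (List (String × String))), Dom_find_closest_item search_term shop_items → Pre_find_closest_item search_term shop_items → Spec_find_closest_item search_term shop_items (find_closest_item search_term shop_items)

-- ===== LEMMAS AND PROOFS =====

theorem pvNormB_eq : pvNormB = pvNormA := rfl
theorem pvItemB_eq : pvItemB = pvItemA := rfl

theorem pv_foldl_min_min (t : List String) : ∀ a b, t.foldl min (min a b) = min a (t.foldl min b) := by
  induction t with
  | nil => intro a b; rfl
  | cons c t ih =>
    intro a b
    simp only [List.foldl_cons]
    rw [min_assoc, ih]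

-- merging B's running best with the minimum of the remaining matches
def pvMerge (best : Option String) (m : Option String) : Option String :=
  match best, m with
  | none, m => m
  | some b, none => some b
  | some b, some m => some (min b m)

theorem pv_merge_cons (x : String) (l : List String) (best : Option String) :
    pvMerge best (PySem.List.min? (x :: l) (fun y => y)) =
      pvMerge (some (match best with | none => x | some b => min b x)) (PySem.List.min? l (fun y => y)) := by
  cases l with
  | nil => cases best <;> rfl
  | cons m t =>
    cases best with
    | none =>
      rw [PySem.List.min?_id_cons, PySem.List.min?_id_cons]
      simp only [pvMerge, List.foldl_cons]
      rw [pv_foldl_min_min]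
    | some b =>
      rw [PySem.List.min?_id_cons, PySem.List.min?_id_cons]
      simp only [pvMerge, List.foldl_cons]
      rw [pv_foldl_min_min, ← min_assoc]

-- one step of the single pass, per case
theorem pv_step_exact (target : String) (item : List (String × String))
    (rest : List (List (String × String))) (best : Option String)
    (hex : (pvNormA (pvItemA item) == target) = true) :
    pvAltLoop target best (item :: rest) = some (pvItemA item) := by
  simp only [pvAltLoop, pvNormB_eq, pvItemB_eq]
  rw [if_pos hex]

theorem pv_step_pre (target : String) (item : List (String × String))
    (rest : List (List (String × String))) (best : Option String)
    (hex : ¬ (pvNormA (pvItemA item) == target) = true)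
    (hpre : PySem.Str.startswith (pvNormA (pvItemA item)) target = true) :
    pvAltLoop target best (item :: rest) =
      pvAltLoop target (some (match best with | none => pvItemA item | some b => min b (pvItemA item))) rest := by
  simp only [pvAltLoop, pvNormB_eq, pvItemB_eq]
  rw [if_neg hex]
  cases best with
  | none => rw [if_pos ⟨hpre, Or.inl rfl⟩]
  | some b =>
    by_cases hlt : pvItemA item < b
    · rw [if_pos ⟨hpre, Or.inr hlt⟩,
        show (match some b with | none => pvItemA item | some b => min b (pvItemA item)) = min b (pvItemA item) from rfl,
        min_def, if_neg (not_le.mpr hlt)]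
    · rw [if_neg (by
          rintro ⟨-, h | h⟩
          · simp at h
          · exact hlt h),
        show (match some b with | none => pvItemA item | some b => min b (pvItemA item)) = min b (pvItemA item) from rfl,
        min_def, if_pos (not_lt.mp hlt)]

theorem pv_step_skip (target : String) (item : List (String × String))
    (rest : List (List (String × String))) (best : Option String)
    (hex : ¬ (pvNormA (pvItemA item) == target) = true)
    (hpre : ¬ PySem.Str.startswith (pvNormA (pvItemA item)) target = true) :
    pvAltLoop target best (item :: rest) = pvAltLoop target best rest := by
  simp only [pvAltLoop, pvNormB_eq, pvItemB_eq]
  rw [if_neg hex, if_neg (by rintro ⟨h, -⟩; exact hpre h)]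

-- the single pass equals: exact match first, else merge best with min of prefix matches
theorem pv_loop_eq (target : String) :
    ∀ (xs : List (List (String × String))) (best : Option String),
      pvAltLoop target best xs =
        match (xs.map (fun item => (pvItemA item, pvNormA (pvItemA item)))).find?
            (fun p => p.2 == target) with
        | some p => some p.1
        | none =>
          pvMerge best (PySem.List.min?
            (((xs.map (fun item => (pvItemA item, pvNormA (pvItemA item)))).filter
                (fun p => PySem.Str.startswith p.2 target)).map (·.1)) (fun y => y)) := by
  intro xs
  induction xs with
  | nil => intro best; cases best <;> rfl
  | cons item rest ih =>
    intro best
    simp only [List.map_cons, List.find?_cons, List.filter_cons]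
    by_cases hex : (pvNormA (pvItemA item) == target) = true
    · rw [pv_step_exact target item rest best hex]
      simp only [hex]
    · rw [show ((pvItemA item, pvNormA (pvItemA item)).2 == target) = false from
        Bool.not_eq_true _ ▸ (by simpa using hex)]
      by_cases hpre : PySem.Str.startswith (pvNormA (pvItemA item)) target = true
      · rw [pv_step_pre target item rest best hex hpre, ih]
        simp only [hpre, if_true, List.map_cons]
        cases (rest.map (fun item => (pvItemA item, pvNormA (pvItemA item)))).find?
            (fun p => p.2 == target) with
        | some p => rfl
        | none => rw [pv_merge_cons]
      · rw [pv_step_skip target item rest best hex hpre, ih best]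
        simp only [hpre, if_false, Bool.false_eq_true]

-- ===== VERDICT (by name: the statement is the Claim_ definition above) =====
theorem find_closest_item_spec : Claim_equal_find_closest_item := by
  intro search_term shop_items _ _
  show find_closest_item search_term shop_items = find_closest_item_alt search_term shop_items
  simp only [find_closest_item, find_closest_item_alt, pvNormB_eq]
  rw [pv_loop_eq]
  cases (shop_items.map (fun item => (pvItemA item, pvNormA (pvItemA item)))).find?
      (fun p => p.2 == pvNormA search_term) with
  | some p => rfl
  | none =>
    cases PySem.List.min?
        (((shop_items.map (fun item => (pvItemA item, pvNormA (pvItemA item)))).filter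
            (fun p => PySem.Str.startswith p.2 (pvNormA search_term))).map (·.1)) (fun y => y) with
    | some m => rfl
    | none => rfl
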